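-- pv_equiv track=rewrite | github.com/wirelessdreamer/AlephTav | app/services/review_service.py | _approver_entries
-- ===== SOURCE A (Python) =====
-- from typing import Any
--
-- def _approver_entries(decisions: list[dict[str, Any]], accepted_decisions: set[str]) -> list[dict[str, str]]:
--     unique: dict[str, dict[str, str]] = {}
--     for decision in decisions:
--         if decision["decision"] not in accepted_decisions:
--             continue
--         unique[decision["reviewer"]] = {
--             "reviewer": decision["reviewer"],
--             "reviewer_role": decision["reviewer_role"],
--         }
--     return sorted(unique.values(), key=lambda item: item["reviewer"])
-- ===== SOURCE B (Python) =====
-- def _approver_entries(decisions, accepted_decisions):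
--     # Sort the accepted decisions by reviewer first (stable), then collapse
--     # adjacent equal-reviewer runs in one scan, keeping the last of each run
--     # (= the overall last accepted decision for that reviewer).
--     accepted = sorted(
--         (d for d in decisions if d["decision"] in accepted_decisions),
--         key=lambda d: d["reviewer"])
--     result = []
--     for d in accepted:
--         entry = {"reviewer": d["reviewer"], "reviewer_role": d["reviewer_role"]}
--         if result and result[-1]["reviewer"] == d["reviewer"]:
--             result[-1] = entry
--         else:
--             result.append(entry)
--     return result
-- ===== Notes on version B (the rewrite author's own statement) =====
-- stated objective: alternative
-- what changed: A deduplicates with a reviewer-keyed dict (last insert wins) and sorts the values afterwards; B instead sorts the filtered decisions by reviewer first and then deduplicates in a single grouped scan, replacing the run's entry so the last of each equal-reviewer run (= overall last, by sort stability) wins.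
import Mathlib
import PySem

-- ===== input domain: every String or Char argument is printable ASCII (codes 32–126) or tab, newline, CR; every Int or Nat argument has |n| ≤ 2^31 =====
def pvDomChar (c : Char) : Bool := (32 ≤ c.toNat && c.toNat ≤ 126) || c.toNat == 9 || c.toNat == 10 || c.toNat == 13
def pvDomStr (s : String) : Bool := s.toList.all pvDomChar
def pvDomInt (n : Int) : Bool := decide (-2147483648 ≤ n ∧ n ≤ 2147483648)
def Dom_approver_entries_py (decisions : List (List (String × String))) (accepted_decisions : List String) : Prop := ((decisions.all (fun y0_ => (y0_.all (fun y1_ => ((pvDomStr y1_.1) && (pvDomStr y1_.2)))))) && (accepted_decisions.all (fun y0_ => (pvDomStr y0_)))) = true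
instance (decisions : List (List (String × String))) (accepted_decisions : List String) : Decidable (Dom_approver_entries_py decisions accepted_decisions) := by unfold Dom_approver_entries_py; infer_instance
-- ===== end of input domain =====

-- B replaces A's dict-overwrite-then-sort by sort-first-then-collapse-adjacent-runs (keep the last
-- of each equal-reviewer run, which by sort stability is the overall last); objective: alternative
-- decomposition, same cost.

-- d[k] on a Python str-dict (assoc list, first match); total form — Pre_ guarantees the key is present
def pvGetS (d : List (String × String)) (k : String) : String := (List.lookup k d).getD ""

-- ===== PORT A =====
def approver_entries_py (decisions : List (List (String × String))) (accepted_decisions : List String) : List (List (String × String)) :=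
  let unique : PySem.Dict String (List (String × String)) :=
    decisions.foldl (fun u decision =>
      if accepted_decisions.contains (pvGetS decision "decision") then
        u.insert (pvGetS decision "reviewer")
          [("reviewer", pvGetS decision "reviewer"),
           ("reviewer_role", pvGetS decision "reviewer_role")]
      else u) PySem.Dict.empty
  PySem.List.sorted unique.values (fun item => pvGetS item "reviewer")

-- ===== PORT B =====
def approver_entries_py_alt (decisions : List (List (String × String))) (accepted_decisions : List String) : List (List (String × String)) :=
  let accepted : List (List (String × String)) :=
    PySem.List.sorted
      (decisions.filter (fun d => accepted_decisions.contains (pvGetS d "decision")))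
      (fun d => pvGetS d "reviewer")
  accepted.foldl (fun result d =>
    let entry : List (String × String) :=
      [("reviewer", pvGetS d "reviewer"), ("reviewer_role", pvGetS d "reviewer_role")]
    match result.getLast? with
    | some last =>
        if pvGetS last "reviewer" = pvGetS d "reviewer" then result.dropLast ++ [entry]
        else result ++ [entry]
    | none => result ++ [entry]) []

-- ===== PRECONDITION & SPEC =====
-- Pre_ excludes exactly the inputs on which the Python A raises KeyError: a decision dict without the
-- key "decision", or an accepted decision without "reviewer" or "reviewer_role".
def Pre_approver_entries_py (decisions : List (List (String × String))) (accepted_decisions : List String) : Prop :=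
  ∀ d ∈ decisions, (List.lookup "decision" d).isSome = true ∧
    (accepted_decisions.contains ((List.lookup "decision" d).getD "") = true →
      (List.lookup "reviewer" d).isSome = true ∧ (List.lookup "reviewer_role" d).isSome = true)
instance (decisions : List (List (String × String))) (accepted_decisions : List String) : Decidable (Pre_approver_entries_py decisions accepted_decisions) := by unfold Pre_approver_entries_py; infer_instance
def pvWitness_approver_entries_py : (List (List (String × String))) × List String :=
  ([[("decision", "approved"), ("reviewer", "bob"), ("reviewer_role", "dev")],
    [("decision", "approved"), ("reviewer", "ann"), ("reviewer_role", "qa")],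
    [("decision", "rejected"), ("reviewer", "cyd"), ("reviewer_role", "ops")],
    [("decision", "approved"), ("reviewer", "bob"), ("reviewer_role", "lead")]],
   ["approved"])

def Spec_approver_entries_py (decisions : List (List (String × String))) (accepted_decisions : List String) (out : List (List (String × String))) : Prop := out = approver_entries_py_alt decisions accepted_decisions
instance (decisions : List (List (String × String))) (accepted_decisions : List String) (out : List (List (String × String))) : Decidable (Spec_approver_entries_py decisions accepted_decisions out) := by unfold Spec_approver_entries_py; infer_instance

-- ===== CLAIM (what is proved, stated in full; the proofs are below) =====
def Claim_equal_approver_entries_py : Prop := ∀ (decisions : List (List (String × String))) (accepted_decisions : List String), Dom_approver_entries_py decisions accepted_decisions → Pre_approver_entries_py decisions accepted_decisions → Spec_approver_entries_py decisions accepted_decisions (approver_entries_py decisions accepted_decisions)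

-- ===== LEMMAS AND PROOFS =====

-- Shorthands for the proof (never used by the ports / Spec_ / Pre_).
def pvKey (d : List (String × String)) : String := pvGetS d "reviewer"
def pvEntry (d : List (String × String)) : List (String × String) :=
  [("reviewer", pvKey d), ("reviewer_role", pvGetS d "reviewer_role")]
-- the entry both programs end up holding for reviewer k: the last matching decision of F wins
def pvVal (F : List (List (String × String))) (k : String) : List (String × String) :=
  ((F.reverse.find? (fun d => pvKey d == k)).map pvEntry).getD []

theorem pvKey_pvEntry (d : List (String × String)) : pvGetS (pvEntry d) "reviewer" = pvKey d := rfl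

-- A's dict lookup after the fold: the last element of F with the given key wins
theorem pvGet?_fold (F : List (List (String × String))) (u0 : PySem.Dict String (List (String × String))) (k : String) :
    (F.foldl (fun u d => u.insert (pvKey d) (pvEntry d)) u0).get? k
      = ((F.reverse.find? (fun d => pvKey d == k)).map pvEntry).or (u0.get? k) := by
  induction F generalizing u0 with
  | nil => simp
  | cons d F ih =>
      simp only [List.foldl_cons, List.reverse_cons, List.find?_append, ih]
      rcases h : F.reverse.find? (fun d => pvKey d == k) with _ | e
      · by_cases hk : pvKey d = k
        · simp [List.find?, hk]
        · have hk' : (pvKey d == k) = false := beq_eq_false_iff_ne.mpr hk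
          simp [List.find?, PySem.Dict.get?_insert, hk', Ne.symm hk]
      · simp [Option.or]

theorem pvVal_key {F : List (List (String × String))} {k : String}
    (h : k ∈ F.map pvKey) : pvKey (pvVal F k) = k ∧ (F.reverse.find? (fun d => pvKey d == k)).isSome = true := by
  have hs : (F.reverse.find? (fun d => pvKey d == k)).isSome = true := by
    rw [List.find?_isSome]
    rcases List.mem_map.mp h with ⟨d, hd, hk⟩
    exact ⟨d, by simpa using hd, by simpa using hk⟩
  rcases ho : F.reverse.find? (fun d => pvKey d == k) with _ | d
  · rw [ho] at hs; simp at hs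
  · have := List.find?_some ho
    refine ⟨?_, by simp⟩
    simp only [pvVal, ho, Option.map_some, Option.getD_some]
    rw [pvKey, pvKey_pvEntry]
    simpa using this

-- last match = getLast? of the filtered list
theorem pv_find_reverse (L : List (List (String × String))) (p : List (String × String) → Bool) :
    L.reverse.find? p = (L.filter p).getLast? := by
  rw [← List.head?_reverse, ← List.filter_reverse, List.head?_filter]


theorem pv_insertBy_filter (x : List (String × String)) (ys : List (List (String × String))) (k : String)
    (h : ys.Pairwise (fun a b => pvKey a ≤ pvKey b)) :
    (PySem.List.insertBy (fun a b => decide (pvKey a < pvKey b)) x ys).filter (fun d => pvKey d == k)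
      = ys.filter (fun d => pvKey d == k) ++ (if pvKey x == k then [x] else []) := by
  induction ys with
  | nil =>
      simp only [PySem.List.insertBy, List.filter_cons, List.filter_nil, List.nil_append]
  | cons y t ih =>
      rw [List.pairwise_cons] at h
      by_cases hlt : pvKey x < pvKey y
      · have hins : PySem.List.insertBy (fun a b => decide (pvKey a < pvKey b)) x (y :: t) = x :: y :: t := by
          simp [PySem.List.insertBy, hlt]
        rw [hins]
        by_cases hk : (pvKey x == k) = true
        · have hk' : pvKey x = k := by simpa using hk
          have hnil : (y :: t).filter (fun d => pvKey d == k) = [] := by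
            rw [List.filter_eq_nil_iff]
            intro d hd
            have hle : pvKey y ≤ pvKey d := by
              rcases List.mem_cons.mp hd with h1 | h1
              · exact h1 ▸ le_refl _
              · exact h.1 d h1
            have hxd : pvKey x < pvKey d := lt_of_lt_of_le hlt hle
            simp only [beq_iff_eq]
            intro hc; rw [hc, ← hk'] at hxd; exact lt_irrefl _ hxd
          rw [List.filter_cons, if_pos hk, hnil, if_pos hk]
          simp
        · have hkf : (pvKey x == k) = false := by simpa using hk
          rw [List.filter_cons, if_neg (by simp [hkf]), if_neg (by simp [hkf])]
          simp
      · have hins : PySem.List.insertBy (fun a b => decide (pvKey a < pvKey b)) x (y :: t)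
            = y :: PySem.List.insertBy (fun a b => decide (pvKey a < pvKey b)) x t := by
          simp [PySem.List.insertBy, hlt]
        rw [hins, List.filter_cons, List.filter_cons, ih h.2]
        by_cases hy : (pvKey y == k) = true
        · rw [if_pos hy, if_pos hy, List.cons_append]
        · rw [if_neg hy, if_neg hy]

theorem pv_sorted_filter_key (xs : List (List (String × String))) (k : String) :
    (PySem.List.sorted xs pvKey false).filter (fun d => pvKey d == k)
      = xs.filter (fun d => pvKey d == k) := by
  induction xs using List.reverseRecOn with
  | nil => rfl
  | append_singleton xs x ih =>
      have hsort : PySem.List.sorted (xs ++ [x]) pvKey false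
          = PySem.List.insertBy (fun a b => decide (pvKey a < pvKey b)) x (PySem.List.sorted xs pvKey false) := by
        rw [PySem.List.sorted_eq_foldl_insertBy, PySem.List.sorted_eq_foldl_insertBy, List.foldl_append]
        rfl
      rw [hsort, pv_insertBy_filter x _ k (PySem.List.sorted_pairwise xs pvKey), ih,
        List.filter_append]
      by_cases hk : (pvKey x == k) = true
      · simp [List.filter, hk]
      · simp [List.filter, hk]

def pvCollapse : List (List (String × String)) → List (List (String × String))
  | [] => []
  | [d] => [pvEntry d]
  | d :: e :: t => if pvKey d = pvKey e then pvCollapse (e :: t) else pvEntry d :: pvCollapse (e :: t)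

theorem pv_foldB (L : List (List (String × String))) (acc : List (List (String × String))) (d : List (String × String)) :
    L.foldl (fun result x =>
      match result.getLast? with
      | some last =>
          if pvGetS last "reviewer" = pvGetS x "reviewer" then result.dropLast ++ [pvEntry x]
          else result ++ [pvEntry x]
      | none => result ++ [pvEntry x]) (acc ++ [pvEntry d]) = acc ++ pvCollapse (d :: L) := by
  induction L generalizing acc d with
  | nil => simp [pvCollapse]
  | cons e t ih =>
      rw [List.foldl_cons, List.getLast?_concat]
      simp only []
      by_cases hk : pvGetS (pvEntry d) "reviewer" = pvGetS e "reviewer"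
      · have hk' : pvKey d = pvKey e := hk
        rw [if_pos hk]
        have hdrop : (acc ++ [pvEntry d]).dropLast = acc := by
          simp
        rw [hdrop, ih acc e]
        simp [pvCollapse, hk']
      · have hk' : ¬ pvKey d = pvKey e := hk
        rw [if_neg hk]
        have : acc ++ [pvEntry d] ++ [pvEntry e] = (acc ++ [pvEntry d]) ++ [pvEntry e] := rfl
        rw [this, ih (acc ++ [pvEntry d]) e]
        simp [pvCollapse, hk']

theorem pv_key_notmem {d e : List (String × String)} {t : List (List (String × String))}
    (h : (d :: e :: t).Pairwise (fun a b => pvKey a ≤ pvKey b)) (hne : pvKey d ≠ pvKey e) :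
    ∀ y ∈ e :: t, pvKey d < pvKey y := by
  rw [List.pairwise_cons] at h
  intro y hy
  rcases List.mem_cons.mp hy with h1 | h1
  · subst h1; exact lt_of_le_of_ne (h.1 y List.mem_cons_self) hne
  · have hde : pvKey d ≤ pvKey e := h.1 e List.mem_cons_self
    have hey : pvKey e ≤ pvKey y := (List.pairwise_cons.mp h.2).1 y h1
    exact lt_of_lt_of_le (lt_of_le_of_ne hde hne) hey

theorem pv_mem_collapse {L : List (List (String × String))}
    (h : L.Pairwise (fun a b => pvKey a ≤ pvKey b)) (x : List (String × String)) :
    x ∈ pvCollapse L ↔ ∃ k ∈ L.map pvKey, some x = ((L.filter (fun d => pvKey d == k)).getLast?).map pvEntry := by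
  induction L using pvCollapse.induct with
  | case1 => simp [pvCollapse]
  | case2 d =>
      simp only [pvCollapse, List.map_cons, List.map_nil, List.mem_cons,
        List.not_mem_nil, or_false]
      constructor
      · rintro rfl
        exact ⟨pvKey d, rfl, by simp [List.filter]⟩
      · rintro ⟨k, rfl, hx⟩
        simp [List.filter] at hx
        exact hx
  | case3 d e t heq ih =>
      have hteq : pvCollapse (d :: e :: t) = pvCollapse (e :: t) := by
        simp [pvCollapse, heq]
      rw [hteq, ih (List.pairwise_cons.mp h).2]
      constructor
      · rintro ⟨k, hk, hx⟩
        refine ⟨k, List.mem_cons_of_mem _ hk, ?_⟩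
        by_cases hdk : (pvKey d == k) = true
        · have hek : (pvKey e == k) = true := by rw [← heq]; exact hdk
          rw [List.filter_cons, if_pos hdk, List.filter_cons, if_pos hek, List.getLast?_cons_cons]
          rwa [List.filter_cons, if_pos hek] at hx
        · rw [List.filter_cons, if_neg hdk]
          exact hx
      · rintro ⟨k, hk, hx⟩
        have hk' : k ∈ (e :: t).map pvKey := by
          rcases List.mem_cons.mp hk with h1 | h1
          · rw [List.map_cons]; exact List.mem_cons.mpr (Or.inl (h1.trans heq))
          · exact h1
        refine ⟨k, hk', ?_⟩
        by_cases hdk : (pvKey d == k) = true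
        · have hek : (pvKey e == k) = true := by rw [← heq]; exact hdk
          rw [List.filter_cons, if_pos hdk, List.filter_cons, if_pos hek, List.getLast?_cons_cons] at hx
          rwa [List.filter_cons, if_pos hek]
        · rwa [List.filter_cons, if_neg hdk] at hx
  | case4 d e t hne ih =>
      have hlt := pv_key_notmem h hne
      have hteq : pvCollapse (d :: e :: t) = pvEntry d :: pvCollapse (e :: t) := by
        simp [pvCollapse, hne]
      have hnil : (e :: t).filter (fun y => pvKey y == pvKey d) = [] := by
        rw [List.filter_eq_nil_iff]
        intro y hy
        simp only [beq_iff_eq]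
        exact fun hc => absurd (hc ▸ hlt y hy) (lt_irrefl _)
      rw [hteq, List.mem_cons, ih (List.pairwise_cons.mp h).2]
      constructor
      · rintro (rfl | ⟨k, hk, hx⟩)
        · refine ⟨pvKey d, by simp, ?_⟩
          rw [List.filter_cons, if_pos (by simp), hnil]
          simp
        · refine ⟨k, List.mem_cons_of_mem _ hk, ?_⟩
          have hdk : (pvKey d == k) = false := by
            rcases List.mem_map.mp hk with ⟨y, hy, rfl⟩
            simpa using ne_of_lt (hlt y hy)
          rw [List.filter_cons, if_neg (by simp [hdk])]
          exact hx
      · rintro ⟨k, hk, hx⟩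
        by_cases hdk : (pvKey d == k) = true
        · left
          have hkd : k = pvKey d := (beq_iff_eq.mp hdk).symm
          subst hkd
          rw [List.filter_cons, if_pos hdk, hnil] at hx
          simp at hx
          exact hx
        · right
          have hk' : k ∈ (e :: t).map pvKey := by
            rcases List.mem_cons.mp hk with h1 | h1
            · exact absurd (by simp [h1]) hdk
            · exact h1
          rw [List.filter_cons, if_neg hdk] at hx
          exact ⟨k, hk', hx⟩

theorem pv_collapse_key_mem {L : List (List (String × String))}
    (h : L.Pairwise (fun a b => pvKey a ≤ pvKey b)) {x : List (String × String)}
    (hx : x ∈ pvCollapse L) : pvGetS x "reviewer" ∈ L.map pvKey := by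
  rcases (pv_mem_collapse h x).mp hx with ⟨k, hk, heq⟩
  rcases ho : (L.filter (fun d => pvKey d == k)).getLast? with _ | w
  · rw [ho] at heq; simp at heq
  · rw [ho] at heq
    simp only [Option.map_some, Option.some_inj] at heq
    have hw : w ∈ L.filter (fun d => pvKey d == k) := List.mem_of_getLast? ho
    have hwk : pvKey w = k := by simpa using (List.mem_filter.mp hw).2
    rw [heq, pvKey_pvEntry, hwk]
    exact hk

theorem pv_collapse_pairwise {L : List (List (String × String))}
    (h : L.Pairwise (fun a b => pvKey a ≤ pvKey b)) :
    (pvCollapse L).Pairwise (fun a b => pvGetS a "reviewer" < pvGetS b "reviewer") := by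
  induction L using pvCollapse.induct with
  | case1 => simp [pvCollapse]
  | case2 d => simp [pvCollapse]
  | case3 d e t heq ih =>
      have : pvCollapse (d :: e :: t) = pvCollapse (e :: t) := by simp [pvCollapse, heq]
      rw [this]
      exact ih (List.pairwise_cons.mp h).2
  | case4 d e t hne ih =>
      have hlt := pv_key_notmem h hne
      have ht : pvCollapse (d :: e :: t) = pvEntry d :: pvCollapse (e :: t) := by
        simp [pvCollapse, hne]
      rw [ht, List.pairwise_cons]
      have htail := (List.pairwise_cons.mp h).2
      refine ⟨?_, ih htail⟩
      intro x hx
      have hk := pv_collapse_key_mem htail hx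
      rcases List.mem_map.mp hk with ⟨y, hy, hky⟩
      rw [pvKey_pvEntry, ← hky]
      exact hlt y hy

-- the canonical result: reviewers in strictly increasing order, each paired with its last accepted decision
theorem pv_main (decisions : List (List (String × String))) (accepted : List String) :
    approver_entries_py decisions accepted = approver_entries_py_alt decisions accepted := by
  set p : List (String × String) → Bool := fun d => accepted.contains (pvGetS d "decision") with hp
  set F : List (List (String × String)) := decisions.filter p with hF
  set K : List String := PySem.Set.ofList (F.map pvKey) with hK
  set C : List (List (String × String)) :=
    (PySem.List.sorted K (fun x => x)).map (pvVal F) with hC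
  have hCpair : List.Pairwise (fun a b => pvGetS a "reviewer" < pvGetS b "reviewer") C := by
    rw [hC, List.pairwise_map]
    refine (PySem.List.sorted_ofList_pairwise_lt (F.map pvKey)).imp_of_mem ?_
    intro a b ha hb hlt
    have ha' : a ∈ F.map pvKey := by
      have := (PySem.List.sorted_perm K (fun x => x) false).mem_iff.mp ha
      rwa [hK, PySem.Set.mem_ofList] at this
    have hb' : b ∈ F.map pvKey := by
      have := (PySem.List.sorted_perm K (fun x => x) false).mem_iff.mp hb
      rwa [hK, PySem.Set.mem_ofList] at this
    show pvKey (pvVal F a) < pvKey (pvVal F b)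
    rw [(pvVal_key ha').1, (pvVal_key hb').1]; exact hlt
  -- A's side
  have hA : approver_entries_py decisions accepted = C := by
    show PySem.List.sorted
      (decisions.foldl (fun u d => if p d = true then u.insert (pvKey d) (pvEntry d) else u)
        PySem.Dict.empty).values (fun item => pvGetS item "reviewer") = C
    rw [PySem.List.foldl_if_eq_foldl_filter p
      (fun u d => u.insert (pvKey d) (pvEntry d)) decisions PySem.Dict.empty, ← hF]
    set U : PySem.Dict String (List (String × String)) :=
      F.foldl (fun u d => u.insert (pvKey d) (pvEntry d)) PySem.Dict.empty with hU
    have hkeys : U.keys = K := by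
      rw [hU, PySem.Dict.keys_foldl_insert_key F pvKey (fun _ d => pvEntry d) PySem.Dict.empty]
      rfl
    have hnd : U.keys.Nodup := by
      rw [hkeys, hK]; exact PySem.Set.nodup_ofList _
    have hvals : U.values = K.map (pvVal F) := by
      rw [PySem.Dict.values_eq_map_keys U hnd [], hkeys]
      refine List.map_congr_left ?_
      intro k hk
      have hk' : k ∈ F.map pvKey := by rwa [hK, PySem.Set.mem_ofList] at hk
      have hfind := (pvVal_key hk').2
      rcases ho : F.reverse.find? (fun d => pvKey d == k) with _ | d
      · rw [ho] at hfind; simp at hfind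
      · rw [PySem.Dict.getD_eq_get?_getD, hU, pvGet?_fold, ho]
        simp [pvVal, ho, Option.or]
    apply PySem.List.sorted_eq_of_perm_of_pairwise_lt
    · rw [hvals, hC]
      exact (PySem.List.sorted_perm K (fun x => x) false).map (pvVal F)
    · exact hCpair
  -- B's side: sort first, then the grouped scan (pvCollapse)
  have hSpair := PySem.List.sorted_pairwise F pvKey
  set S : List (List (String × String)) := PySem.List.sorted F pvKey false with hS
  have hB : approver_entries_py_alt decisions accepted = pvCollapse S := by
    show S.foldl (fun result x =>
      match result.getLast? with
      | some last =>
          if pvGetS last "reviewer" = pvGetS x "reviewer" then result.dropLast ++ [pvEntry x]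
          else result ++ [pvEntry x]
      | none => result ++ [pvEntry x]) [] = pvCollapse S
    rcases hcase : S with _ | ⟨d, t⟩
    · rfl
    · rw [List.foldl_cons]
      show t.foldl _ ([] ++ [pvEntry d]) = _
      rw [pv_foldB]
      simp
  have hColC : pvCollapse S = C := by
    have hcp := pv_collapse_pairwise hSpair
    have hndCol : (pvCollapse S).Nodup :=
      hcp.imp (fun hab => fun hc => absurd (hc ▸ hab) (lt_irrefl _))
    have hndC : C.Nodup :=
      hCpair.imp (fun hab => fun hc => absurd (hc ▸ hab) (lt_irrefl _))
    have hperm : (pvCollapse S).Perm C := by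
      rw [List.perm_ext_iff_of_nodup hndCol hndC]
      intro x
      rw [pv_mem_collapse hSpair x]
      constructor
      · rintro ⟨k, hk, hx⟩
        have hkF : k ∈ F.map pvKey := by
          have := ((PySem.List.sorted_perm F pvKey false).map pvKey).mem_iff.mp hk
          exact this
        have hval : some x = some (pvVal F k) := by
          rw [hx, hS, pv_sorted_filter_key, ← pv_find_reverse]
          rcases ho : F.reverse.find? (fun d => pvKey d == k) with _ | w
          · have := (pvVal_key hkF).2; rw [ho] at this; simp at this
          · simp [pvVal, ho]
        rw [hC]
        refine List.mem_map.mpr ⟨k, ?_, (Option.some_inj.mp hval).symm⟩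
        rw [PySem.List.mem_sorted, hK, PySem.Set.mem_ofList]
        exact hkF
      · intro hx
        rcases List.mem_map.mp (hC ▸ hx) with ⟨k, hk, hkx⟩
        have hkF : k ∈ F.map pvKey := by
          rw [PySem.List.mem_sorted, hK, PySem.Set.mem_ofList] at hk
          exact hk
        refine ⟨k, ((PySem.List.sorted_perm F pvKey false).map pvKey).mem_iff.mpr hkF, ?_⟩
        rw [hS, pv_sorted_filter_key, ← pv_find_reverse, ← hkx]
        rcases ho : F.reverse.find? (fun d => pvKey d == k) with _ | w
        · have := (pvVal_key hkF).2; rw [ho] at this; simp at this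
        · simp [pvVal, ho]
    have h1 : PySem.List.sorted C (fun item => pvGetS item "reviewer") false = pvCollapse S :=
      PySem.List.sorted_eq_of_perm_of_pairwise_lt C (pvCollapse S) (fun item => pvGetS item "reviewer") hperm hcp
    have h2 : PySem.List.sorted C (fun item => pvGetS item "reviewer") false = C :=
      PySem.List.sorted_eq_self_of_pairwise C (fun item => pvGetS item "reviewer") (hCpair.imp le_of_lt)
    rw [← h1, h2]
  rw [hA, hB, hColC]

-- ===== VERDICT (by name: the statement is the Claim_ definition above) =====
theorem approver_entries_py_spec : Claim_equal_approver_entries_py := by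
  intro decisions accepted _ _
  show approver_entries_py decisions accepted = approver_entries_py_alt decisions accepted
  exact pv_main decisions accepted
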